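-- pv_equiv track=rewrite | github.com/yorkshirelandscape/musebot | seeding/utils.py | insert_byes
-- ===== SOURCE A (Python) =====
-- import itertools
--
-- def chunk(lst, n):
--     """
--     Returns successive tuples of length n from input iterator.
--
--     The last tuple may be shorter than n if it reaches the end of the iterator
--     early.
--
--     :param lst: Input iterator to chunk
--     :param n: Desired length of output tuples
--     :returns: Iterator of tuples of length n (except, possibly, the last tuple)
--     """
--
--     it = iter(lst)
--     return iter(lambda: tuple(itertools.islice(it, n)), ())
--
-- def has_byes(n):
--     """
--     Returns True if the bracket size, n, needs byes in the first round
--     """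
--
--     return n in {48, 96}
--
-- def insert_byes(seeds):
--     """
--     If byes are required, inserts dummy seeds for the bye rows.
--
--     If any changes are required, returns a new copy of the seeds list with the
--     bye seeds interleaved.
--     """
--
--     n = len(seeds)
--
--     if has_byes(n):
--         # Every fourth submission should be a bye
--         # The bye submissions are all at the end, so adding n to a 0-based index
--         # will give a bye submission index
--         seeds = list(
--             itertools.chain.from_iterable(
--                 trio + (i + n,) for i, trio in enumerate(chunk(seeds, 3))
--             )
--         )
--
--     return seeds
-- ===== SOURCE B (Python) =====
-- def insert_byes(seeds):
--     """
--     If byes are required, inserts dummy seeds for the bye rows.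
--
--     Walks the output slots: every fourth slot gets the next bye seed,
--     every other slot gets the next real seed.
--     """
--     n = len(seeds)
--     if n not in (48, 96):
--         return seeds
--     total = n + n // 3
--     out = []
--     ptr = 0
--     bye = n
--     pos = 0
--     while pos < total:
--         if pos % 4 == 3:
--             out.append(bye)
--             bye += 1
--         else:
--             out.append(seeds[ptr])
--             ptr += 1
--         pos += 1
--     return out
-- ===== Notes on version B (the rewrite author's own statement) =====
-- stated objective: alternative
-- what changed: Replaces the itertools chunk-into-trios + chain flattening with a single loop over output positions that keeps a seed pointer and a bye counter, appending the bye counter at every position congruent 3 mod 4.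
import Mathlib
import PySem

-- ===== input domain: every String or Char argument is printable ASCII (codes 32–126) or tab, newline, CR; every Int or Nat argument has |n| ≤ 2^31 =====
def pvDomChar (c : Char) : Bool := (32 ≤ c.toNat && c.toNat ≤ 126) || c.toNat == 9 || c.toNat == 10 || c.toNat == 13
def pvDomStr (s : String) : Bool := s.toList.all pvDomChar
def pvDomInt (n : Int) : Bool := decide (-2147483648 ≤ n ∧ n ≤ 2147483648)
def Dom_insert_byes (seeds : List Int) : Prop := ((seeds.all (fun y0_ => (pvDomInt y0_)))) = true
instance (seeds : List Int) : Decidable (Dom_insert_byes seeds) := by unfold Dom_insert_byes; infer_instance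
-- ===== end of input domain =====

-- B replaces A's chunk-into-trios + itertools flattening by a single walk over the
-- output slots with a seed pointer and a bye counter (alternative decomposition, same cost).

-- ===== PORT A =====
-- chunk(lst, 3): successive trios from the list (the last one may be shorter)
def pvChunk3 : List Int → List (List Int)
  | [] => []
  | [a] => [[a]]
  | [a, b] => [[a, b]]
  | a :: b :: c :: t => [a, b, c] :: pvChunk3 t

def insert_byes (seeds : List Int) : List Int :=
  let n : Int := (seeds.length : Int)
  -- has_byes(n): n in {48, 96}
  if seeds.length = 48 ∨ seeds.length = 96 then
    -- list(chain.from_iterable(trio + (i + n,) for i, trio in enumerate(chunk(seeds, 3))))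
    (PySem.List.enumerate (pvChunk3 seeds) 0).flatMap (fun p => p.2 ++ [p.1 + n])
  else seeds

-- ===== PORT B =====
-- while pos < total: bye slot when pos % 4 == 3, else seeds[ptr]; fuel = total - pos.
-- seeds[ptr] is always in range here (ptr < len(seeds) throughout), so getD is exact.
def pvWalk (seeds : List Int) : Nat → Nat → Int → Nat → List Int
  | _, _, _, 0 => []
  | pos, ptr, bye, fuel + 1 =>
    if pos % 4 = 3 then bye :: pvWalk seeds (pos + 1) ptr (bye + 1) fuel
    else seeds.getD ptr 0 :: pvWalk seeds (pos + 1) (ptr + 1) bye fuel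

def insert_byes_alt (seeds : List Int) : List Int :=
  let n := seeds.length
  if n = 48 ∨ n = 96 then pvWalk seeds 0 0 (n : Int) (n + n / 3) else seeds

-- ===== PRECONDITION & SPEC =====
def Spec_insert_byes (seeds : List Int) (out : List Int) : Prop := out = insert_byes_alt seeds
instance (seeds : List Int) (out : List Int) : Decidable (Spec_insert_byes seeds out) := by unfold Spec_insert_byes; infer_instance

-- ===== CLAIM (what is proved, stated in full; the proofs are below) =====
def Claim_equal_insert_byes : Prop := ∀ (seeds : List Int), Dom_insert_byes seeds → Spec_insert_byes seeds (insert_byes seeds)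

-- ===== LEMMAS AND PROOFS =====

-- Common shape of both results on a list whose length is a multiple of 3:
-- three seeds, then the running bye value, and so on.
def pvSpec : List Int → Int → List Int
  | a :: b :: c :: t, bye => a :: b :: c :: bye :: pvSpec t (bye + 1)
  | l, _ => l

theorem pvChunk3_flat (k : Nat) : ∀ (l : List Int) (s n : Int), l.length = 3 * k →
    (PySem.List.enumerate (pvChunk3 l) s).flatMap (fun p => p.2 ++ [p.1 + n]) = pvSpec l (n + s) := by
  induction k with
  | zero =>
    intro l s n hl
    have : l = [] := List.eq_nil_of_length_eq_zero (by omega)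
    subst this
    rfl
  | succ k ih =>
    intro l s n hl
    match l, hl with
    | a :: b :: c :: t, hl =>
      have ht : t.length = 3 * k := by simp at hl; omega
      simp only [pvChunk3, PySem.List.enumerate_cons, List.flatMap_cons]
      rw [ih t (s + 1) n ht]
      simp only [pvSpec, List.cons_append, List.nil_append]
      have e1 : s + n = n + s := by ring
      have e2 : n + (s + 1) = n + s + 1 := by ring
      rw [e1, e2]

theorem pvWalk_eq (k : Nat) : ∀ (l : List Int) (pos ptr : Nat) (bye : Int),
    pos % 4 = 0 → (l.drop ptr).length = 3 * k →
    pvWalk l pos ptr bye (4 * k) = pvSpec (l.drop ptr) bye := by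
  induction k with
  | zero =>
    intro l pos ptr bye _ hl
    have : l.drop ptr = [] := List.eq_nil_of_length_eq_zero (by omega)
    rw [this]
    simp [pvWalk, pvSpec]
  | succ k ih =>
    intro l pos ptr bye hpos hl
    obtain ⟨a, b, c, t, hd⟩ : ∃ a b c t, l.drop ptr = a :: b :: c :: t := by
      match h : l.drop ptr, hl with
      | x :: y :: z :: t, _ => exact ⟨x, y, z, t, rfl⟩
    have hdt : l.drop (ptr + 3) = t := by
      have h3 : (l.drop ptr).drop 3 = t := by rw [hd]; rfl
      rw [← h3, List.drop_drop]
    have ht : (l.drop (ptr + 3)).length = 3 * k := by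
      rw [hdt]
      rw [hd] at hl
      simp at hl
      omega
    have ga : l.getD ptr 0 = a := by
      have h0 : (l.drop ptr)[0]? = l[ptr + 0]? := List.getElem?_drop ..
      simp [hd] at h0
      simp [List.getD_eq_getElem?_getD, ← h0]
    have gb : l.getD (ptr + 1) 0 = b := by
      have h1 : (l.drop ptr)[1]? = l[ptr + 1]? := List.getElem?_drop ..
      simp [hd] at h1
      simp [List.getD_eq_getElem?_getD, ← h1]
    have gc : l.getD (ptr + 2) 0 = c := by
      have h2 : (l.drop ptr)[2]? = l[ptr + 2]? := List.getElem?_drop ..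
      simp [hd] at h2
      simp [List.getD_eq_getElem?_getD, ← h2]
    have e4 : 4 * (k + 1) = (4 * k) + 1 + 1 + 1 + 1 := by omega
    rw [e4]
    simp only [pvWalk]
    rw [if_neg (by omega), if_neg (by omega), if_neg (by omega), if_pos (by omega)]
    have hrec : pvWalk l (pos + 1 + 1 + 1 + 1) (ptr + 1 + 1 + 1) (bye + 1) (4 * k)
        = pvSpec (l.drop (ptr + 3)) (bye + 1) := by
      have : ptr + 1 + 1 + 1 = ptr + 3 := by omega
      rw [this]
      exact ih l (pos + 1 + 1 + 1 + 1) (ptr + 3) (bye + 1) (by omega) ht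
    rw [ga, gb, gc, hrec, hdt, hd, pvSpec]

-- ===== VERDICT (by name: the statement is the Claim_ definition above) =====
theorem insert_byes_spec : Claim_equal_insert_byes := by
  intro seeds _
  unfold Spec_insert_byes insert_byes insert_byes_alt
  by_cases h : seeds.length = 48 ∨ seeds.length = 96
  · simp only [if_pos h]
    rcases h with h | h
    · rw [pvChunk3_flat 16 seeds 0 (seeds.length : Int) (by omega),
        h, pvWalk_eq 16 seeds 0 0 _ (by omega) (by simp [h])]
      simp
    · rw [pvChunk3_flat 32 seeds 0 (seeds.length : Int) (by omega),
        h, pvWalk_eq 32 seeds 0 0 _ (by omega) (by simp [h])]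
      simp
  · simp only [if_neg h]
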